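-- pv_equiv track=rewrite | github.com/onurcan-b/SQLite-Python-Database | data/makedb.py | generate_times
-- ===== SOURCE A (Python) =====
-- def generate_times(id):
--     """ assign random(ish) times based on id """
--     times = {}
--     for day in ["mon", "tue", "wed", "thu", "fri", "sat", "sun"]:
--         # 9-5
--         times[day] = {
--             "open": "0900",
--             "close": "1700",
--         }
--         if id % 3 == 0:
--             # 8-6
--             times[day]["open"] = "0800"
--             times[day]["close"] = "1800"
--         if id % 11 == 0:
--             # 5-11
--             times[day]["open"] = "0500"
--             times[day]["close"] = "2300"
--         if id % 17 == 0:
--             # 24 hours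
--             times[day]["open"] = "0000"
--             times[day]["close"] = "2400"
--         if day in ("sat", "sun") and id % 7 == 0:
--             # 24 hours on weekend
--             times[day]["open"] = "0000"
--             times[day]["close"] = "2400"
--         if day == "wed" and id % 5:
--             # closed on wednesday
--             times[day]["open"] = "0000"
--             times[day]["close"] = "0000"
--
--     return times
-- ===== SOURCE B (Python) =====
-- def generate_times(id):
--     """assign times based on id: compute the base open/close pair once, then assemble the week"""
--     o, c = "0900", "1700"
--     if id % 3 == 0:
--         o, c = "0800", "1800"
--     if id % 11 == 0:
--         o, c = "0500", "2300"
--     if id % 17 == 0: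
--         o, c = "0000", "2400"
--     def base():
--         return {"open": o, "close": c}
--     weekend = (lambda: {"open": "0000", "close": "2400"}) if id % 7 == 0 else base
--     wed = base() if id % 5 == 0 else {"open": "0000", "close": "0000"}
--     return {"mon": base(), "tue": base(), "wed": wed,
--             "thu": base(), "fri": base(), "sat": weekend(), "sun": weekend()}
-- ===== Notes on version B (the rewrite author's own statement) =====
-- stated objective: simpler
-- what changed: B computes the open/close cascade (id%3, id%11, id%17) once instead of re-running it for every day inside the loop, then assembles the 7-day dict directly with weekend and wednesday overrides, with a fresh dict per day.
import Mathlib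
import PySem

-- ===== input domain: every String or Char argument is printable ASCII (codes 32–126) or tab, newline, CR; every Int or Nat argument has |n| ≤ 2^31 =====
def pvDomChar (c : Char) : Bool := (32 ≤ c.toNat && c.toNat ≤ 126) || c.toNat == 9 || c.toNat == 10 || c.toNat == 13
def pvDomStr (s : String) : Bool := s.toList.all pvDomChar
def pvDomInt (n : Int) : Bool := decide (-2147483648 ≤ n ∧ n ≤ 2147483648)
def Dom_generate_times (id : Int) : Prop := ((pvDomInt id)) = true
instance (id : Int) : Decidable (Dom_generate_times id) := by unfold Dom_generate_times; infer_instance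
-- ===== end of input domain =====

-- B computes the base open/close pair once and assembles the week directly, instead of
-- re-running the whole override cascade inside the per-day loop (objective: simpler).

-- ===== PORT A =====
-- one iteration of A's for-loop body over `day`
def pvDayStepA (id : Int) (times : PySem.Dict String (PySem.Dict String String)) (day : String) :
    PySem.Dict String (PySem.Dict String String) :=
  let times := times.insert day (PySem.Dict.ofList [("open", "0900"), ("close", "1700")])
  let times := if PySem.Int.mod id 3 == 0 then
      (times.modify day PySem.Dict.empty (fun d => d.insert "open" "0800")).modify day
        PySem.Dict.empty (fun d => d.insert "close" "1800")
    else times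
  let times := if PySem.Int.mod id 11 == 0 then
      (times.modify day PySem.Dict.empty (fun d => d.insert "open" "0500")).modify day
        PySem.Dict.empty (fun d => d.insert "close" "2300")
    else times
  let times := if PySem.Int.mod id 17 == 0 then
      (times.modify day PySem.Dict.empty (fun d => d.insert "open" "0000")).modify day
        PySem.Dict.empty (fun d => d.insert "close" "2400")
    else times
  let times := if (day == "sat" || day == "sun") && PySem.Int.mod id 7 == 0 then
      (times.modify day PySem.Dict.empty (fun d => d.insert "open" "0000")).modify day
        PySem.Dict.empty (fun d => d.insert "close" "2400")
    else times
  let times := if day == "wed" && PySem.Int.mod id 5 != 0 then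
      (times.modify day PySem.Dict.empty (fun d => d.insert "open" "0000")).modify day
        PySem.Dict.empty (fun d => d.insert "close" "0000")
    else times
  times

def generate_times (id : Int) : List (String × List (String × String)) :=
  let times := ["mon", "tue", "wed", "thu", "fri", "sat", "sun"].foldl (pvDayStepA id) PySem.Dict.empty
  times.items.map (fun p => (p.1, p.2.items))

-- ===== PORT B =====
def generate_times_alt (id : Int) : List (String × List (String × String)) :=
  let oc : String × String := ("0900", "1700")
  let oc := if PySem.Int.mod id 3 == 0 then ("0800", "1800") else oc
  let oc := if PySem.Int.mod id 11 == 0 then ("0500", "2300") else oc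
  let oc := if PySem.Int.mod id 17 == 0 then ("0000", "2400") else oc
  let base : List (String × String) := [("open", oc.1), ("close", oc.2)]
  let weekend := if PySem.Int.mod id 7 == 0 then [("open", "0000"), ("close", "2400")] else base
  let wed := if PySem.Int.mod id 5 == 0 then base else [("open", "0000"), ("close", "0000")]
  [("mon", base), ("tue", base), ("wed", wed), ("thu", base), ("fri", base),
   ("sat", weekend), ("sun", weekend)]

-- ===== PRECONDITION & SPEC =====
def Spec_generate_times (id : Int) (out : List (String × List (String × String))) : Prop := out = generate_times_alt id
instance (id : Int) (out : List (String × List (String × String))) : Decidable (Spec_generate_times id out) := by unfold Spec_generate_times; infer_instance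

-- ===== CLAIM (what is proved, stated in full; the proofs are below) =====
def Claim_equal_generate_times : Prop := ∀ (id : Int), Dom_generate_times id → Spec_generate_times id (generate_times id)

-- ===== LEMMAS AND PROOFS =====

-- booleans abstracted out of both ports (proof helpers)
def pvStepAbs (b3 b11 b17 b7 : Bool) (b5 : Bool) (times : PySem.Dict String (PySem.Dict String String)) (day : String) :
    PySem.Dict String (PySem.Dict String String) :=
  let times := times.insert day (PySem.Dict.ofList [("open", "0900"), ("close", "1700")])
  let times := if b3 then
      (times.modify day PySem.Dict.empty (fun d => d.insert "open" "0800")).modify day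
        PySem.Dict.empty (fun d => d.insert "close" "1800")
    else times
  let times := if b11 then
      (times.modify day PySem.Dict.empty (fun d => d.insert "open" "0500")).modify day
        PySem.Dict.empty (fun d => d.insert "close" "2300")
    else times
  let times := if b17 then
      (times.modify day PySem.Dict.empty (fun d => d.insert "open" "0000")).modify day
        PySem.Dict.empty (fun d => d.insert "close" "2400")
    else times
  let times := if (day == "sat" || day == "sun") && b7 then
      (times.modify day PySem.Dict.empty (fun d => d.insert "open" "0000")).modify day
        PySem.Dict.empty (fun d => d.insert "close" "2400")
    else times
  let times := if day == "wed" && !b5 then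
      (times.modify day PySem.Dict.empty (fun d => d.insert "open" "0000")).modify day
        PySem.Dict.empty (fun d => d.insert "close" "0000")
    else times
  times

def pvAabs (b3 b11 b17 b7 b5 : Bool) : List (String × List (String × String)) :=
  (["mon", "tue", "wed", "thu", "fri", "sat", "sun"].foldl (pvStepAbs b3 b11 b17 b7 b5)
    PySem.Dict.empty).items.map (fun p => (p.1, p.2.items))

def pvBabs (b3 b11 b17 b7 b5 : Bool) : List (String × List (String × String)) :=
  let oc : String × String := ("0900", "1700")
  let oc := if b3 then ("0800", "1800") else oc
  let oc := if b11 then ("0500", "2300") else oc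
  let oc := if b17 then ("0000", "2400") else oc
  let base : List (String × String) := [("open", oc.1), ("close", oc.2)]
  let weekend := if b7 then [("open", "0000"), ("close", "2400")] else base
  let wed := if b5 then base else [("open", "0000"), ("close", "0000")]
  [("mon", base), ("tue", base), ("wed", wed), ("thu", base), ("fri", base),
   ("sat", weekend), ("sun", weekend)]

set_option maxRecDepth 4096 in
theorem pvAabs_eq_pvBabs : ∀ b3 b11 b17 b7 b5 : Bool, pvAabs b3 b11 b17 b7 b5 = pvBabs b3 b11 b17 b7 b5 := by
  decide

theorem pvA_eq_abs (id : Int) :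
    generate_times id = pvAabs (PySem.Int.mod id 3 == 0) (PySem.Int.mod id 11 == 0)
      (PySem.Int.mod id 17 == 0) (PySem.Int.mod id 7 == 0) (PySem.Int.mod id 5 == 0) := rfl

theorem pvB_eq_abs (id : Int) :
    generate_times_alt id = pvBabs (PySem.Int.mod id 3 == 0) (PySem.Int.mod id 11 == 0)
      (PySem.Int.mod id 17 == 0) (PySem.Int.mod id 7 == 0) (PySem.Int.mod id 5 == 0) := rfl

-- ===== VERDICT (by name: the statement is the Claim_ definition above) =====
theorem generate_times_spec : Claim_equal_generate_times := by
  intro id _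
  show generate_times id = generate_times_alt id
  rw [pvA_eq_abs, pvB_eq_abs, pvAabs_eq_pvBabs]
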